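-- pv_equiv track=rewrite | github.com/rm206/LeetCode-solutions | 2104-sum-of-subarray-ranges/2104-sum-of-subarray-ranges.py | subArrayRanges
-- ===== SOURCE A (Python) =====
-- from typing import List
--
-- def subArrayRanges(nums: List[int]) -> int:
--     def sumSubarrayMins(arr):
--         def calc_nse():
--             res = [len(arr)] * len(arr)
--             stack = []
--
--             for i in range(len(arr)):
--                 while stack and arr[stack[-1]] > arr[i]:
--                     index = stack.pop()
--                     res[index] = i
--                 stack.append(i)
--
--             return res
--
--         def calc_psee():
--             res = [-1] * len(arr)
--             stack = []
--
--             for i in range(len(arr)):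
--                 if not stack:
--                     stack.append(i)
--                 else:
--                     while stack and arr[stack[-1]] > arr[i]:
--                         stack.pop()
--                     res[i] = stack[-1] if stack else -1
--                     stack.append(i)
--
--             return res
--
--         nse = calc_nse()
--         prev_eq_or_smaller = calc_psee()
--
--         res = 0
--         for i in range(len(arr)):
--             left = i - prev_eq_or_smaller[i]
--             right = nse[i] - i
--
--             res += left * right * arr[i]
--
--         return res
--
--     def sumSubarrayMaxes(arr):
--         def calc_nge():
--             res = [len(arr)] * len(arr)
--             stack = []
--
--             for i in range(len(arr)):
--                 while stack and arr[stack[-1]] <= arr[i]: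
--                     index = stack.pop()
--                     res[index] = i
--                 stack.append(i)
--
--             return res
--
--         def calc_pgee():
--             res = [-1] * len(arr)
--             stack = []
--
--             for i in range(len(arr)):
--                 if not stack:
--                     stack.append(i)
--                 else:
--                     while stack and arr[stack[-1]] <= arr[i]:
--                         stack.pop()
--                     res[i] = stack[-1] if stack else -1
--                     stack.append(i)
--
--             return res
--
--         nge = calc_nge()
--         prev_eq_or_greater = calc_pgee()
--
--         res = 0
--         for i in range(len(arr)):
--             left = i - prev_eq_or_greater[i]
--             right = nge[i] - i
--
--             res += left * right * arr[i]
--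
--         return res
--
--     return sumSubarrayMaxes(nums) - sumSubarrayMins(nums)
-- ===== SOURCE B (Python) =====
-- def subArrayRanges(nums):
--     total = 0
--     n = len(nums)
--     for i in range(n):
--         cur_min = cur_max = nums[i]
--         for j in range(i, n):
--             v = nums[j]
--             if v < cur_min:
--                 cur_min = v
--             if v > cur_max:
--                 cur_max = v
--             total += cur_max - cur_min
--     return total
-- ===== Notes on version B (the rewrite author's own statement) =====
-- stated objective: simpler
-- what changed: A's four monotonic-stack passes (next/prev smaller and greater-or-equal boundary tables combined into per-index contribution counts) are replaced by a direct double loop that keeps a running min and max of nums[i..j] and accumulates (max - min) over all subarrays.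
import Mathlib
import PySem

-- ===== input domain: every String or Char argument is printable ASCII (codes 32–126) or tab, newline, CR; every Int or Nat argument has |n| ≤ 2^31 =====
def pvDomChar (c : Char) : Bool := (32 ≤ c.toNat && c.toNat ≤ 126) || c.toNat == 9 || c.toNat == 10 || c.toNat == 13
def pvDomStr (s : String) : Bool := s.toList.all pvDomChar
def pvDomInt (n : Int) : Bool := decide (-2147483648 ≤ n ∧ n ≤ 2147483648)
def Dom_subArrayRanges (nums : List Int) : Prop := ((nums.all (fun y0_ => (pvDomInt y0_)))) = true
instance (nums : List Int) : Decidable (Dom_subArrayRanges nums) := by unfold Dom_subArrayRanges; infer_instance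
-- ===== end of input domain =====

-- B replaces A's four monotonic-stack passes by a direct double loop that keeps a running min/max
-- of each subarray (objective: simpler; B is asymptotically slower, O(n^2) vs A's O(n)).


-- ===== PORT A =====
-- A's calc_nse/calc_nge are the same stack loop up to the pop comparison (> resp. <=),
-- as are calc_psee/calc_pgee; they are ported as one helper parameterised by that comparison.
-- 'while stack and arr[stack[-1]] ⊲ arr[i]: index = stack.pop(); res[index] = i' (stack top = list head)
def popNextLoop (pop : Int → Int → Bool) (arr : List Int) (i : Nat) :
    List Nat → List Int → List Nat × List Int
  | [], res => ([], res)
  | t :: st, res =>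
    if pop (arr.getD t 0) (arr.getD i 0) then popNextLoop pop arr i st (res.set t (i : Int))
    else (t :: st, res)

-- calc_nse / calc_nge: res = [len(arr)]*len(arr); for i in range(len(arr)): pop loop; stack.append(i)
def calcNext (pop : Int → Int → Bool) (arr : List Int) : List Int :=
  ((List.range arr.length).foldl
    (fun (p : List Nat × List Int) i =>
      match popNextLoop pop arr i p.1 p.2 with
      | (st, res) => (i :: st, res))
    ([], List.replicate arr.length (arr.length : Int))).2

-- 'while stack and arr[stack[-1]] ⊲ arr[i]: stack.pop()'
def popPrevLoop (pop : Int → Int → Bool) (arr : List Int) (i : Nat) : List Nat → List Nat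
  | [] => []
  | t :: st => if pop (arr.getD t 0) (arr.getD i 0) then popPrevLoop pop arr i st else t :: st

-- calc_psee / calc_pgee: res = [-1]*len(arr); 'if not stack: stack.append(i) else: pop loop;
-- res[i] = stack[-1] if stack else -1; stack.append(i)'
def calcPrev (pop : Int → Int → Bool) (arr : List Int) : List Int :=
  ((List.range arr.length).foldl
    (fun (p : List Nat × List Int) i =>
      match p.1 with
      | [] => (i :: p.1, p.2)
      | _ :: _ =>
        match popPrevLoop pop arr i p.1 with
        | [] => ([i], p.2.set i (-1))
        | t :: st => (i :: t :: st, p.2.set i (t : Int)))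
    ([], List.replicate arr.length (-1 : Int))).2

-- sumSubarrayMins / sumSubarrayMaxes: 'res += (i - prev[i]) * (next[i] - i) * arr[i]'
def sumPart (pop : Int → Int → Bool) (arr : List Int) : Int :=
  let nx := calcNext pop arr
  let pv := calcPrev pop arr
  (List.range arr.length).foldl
    (fun (res : Int) (i : Nat) => res + ((i : Int) - pv.getD i 0) * (nx.getD i 0 - (i : Int)) * arr.getD i 0) 0

-- return sumSubarrayMaxes(nums) - sumSubarrayMins(nums)
def subArrayRanges (nums : List Int) : Int :=
  sumPart (fun x y => decide (x ≤ y)) nums - sumPart (fun x y => decide (y < x)) nums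

-- ===== PORT B =====
-- direct double loop: running min/max of nums[i..j], accumulate (max - min)
def subArrayRanges_alt (nums : List Int) : Int :=
  (List.range nums.length).foldl
    (fun total i =>
      ((List.range' i (nums.length - i)).foldl
        (fun (s : Int × Int × Int) j =>
          let v := nums.getD j 0
          let cmin := if v < s.1 then v else s.1
          let cmax := if v > s.2.1 then v else s.2.1
          (cmin, cmax, s.2.2 + (cmax - cmin)))
        (nums.getD i 0, nums.getD i 0, total)).2.2)
    0

-- ===== PRECONDITION & SPEC =====
def Spec_subArrayRanges (nums : List Int) (out : Int) : Prop := out = subArrayRanges_alt nums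
instance (nums : List Int) (out : Int) : Decidable (Spec_subArrayRanges nums out) := by unfold Spec_subArrayRanges; infer_instance

-- ===== CLAIM (what is proved, stated in full; the proofs are below) =====
def Claim_equal_subArrayRanges : Prop := ∀ (nums : List Int), Dom_subArrayRanges nums → Spec_subArrayRanges nums (subArrayRanges nums)

-- ===== LEMMAS AND PROOFS =====

-- array access and the pop relation
def aG (arr : List Int) (j : Nat) : Int := arr.getD j 0
def Pp (pop : Int → Int → Bool) (arr : List Int) (i j : Nat) : Prop := pop (aG arr i) (aG arr j) = true

-- the two comparator properties the stack argument needs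
def PopOK (pop : Int → Int → Bool) : Prop :=
  (∀ x y z, pop x y = true → pop y z = true → pop x z = true) ∧
  (∀ x y z, ¬ pop x y = true → pop x z = true → pop y z = true)

theorem popOK_max : PopOK (fun x y => decide (x ≤ y)) := by
  constructor <;> intro x y z h1 h2 <;> simp_all <;> omega

theorem popOK_min : PopOK (fun x y => decide (y < x)) := by
  constructor <;> intro x y z h1 h2 <;> simp_all <;> omega

theorem popOK_not_trans {pop : Int → Int → Bool} (h : PopOK pop) {x y z : Int}
    (h1 : ¬ pop x y = true) (h2 : ¬ pop y z = true) : ¬ pop x z = true := by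
  intro hxz
  exact h2 (h.2 x y z h1 hxz)

-- j is "alive" after processing indices [0,k): no later index in [0,k) pops it
def Alive (pop : Int → Int → Bool) (arr : List Int) (k j : Nat) : Prop :=
  j < k ∧ ∀ j', j < j' → j' < k → ¬ Pp pop arr j j'

-- value of nse/nge restricted to indices < k (k = arr.length gives the final value)
def partNext (pop : Int → Int → Bool) (arr : List Int) (k j : Nat) : Int :=
  match (List.range' (j+1) (k - (j+1))).find? (fun j' => pop (aG arr j) (aG arr j')) with
  | some j' => (j' : Int)
  | none => (arr.length : Int)

def nextIdx (pop : Int → Int → Bool) (arr : List Int) (j : Nat) : Int :=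
  partNext pop arr arr.length j

def prevIdx (pop : Int → Int → Bool) (arr : List Int) (i : Nat) : Int :=
  match (List.range i).reverse.find? (fun j => ! pop (aG arr j) (aG arr i)) with
  | some j => (j : Int)
  | none => -1

-- index selected for subarray [l,r] (first argmin / last argmax, depending on pop)
def sel (pop : Int → Int → Bool) (arr : List Int) (l : Nat) : Nat → Nat
  | 0 => l
  | r+1 => if r+1 ≤ l then l
           else if pop (aG arr (sel pop arr l r)) (aG arr (r+1)) then r+1 else sel pop arr l r

def Good (pop : Int → Int → Bool) (arr : List Int) (l r i : Nat) : Prop :=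
  l ≤ i ∧ i ≤ r ∧ (∀ k < i, l ≤ k → Pp pop arr k i) ∧ (∀ k < r+1, i < k → ¬ Pp pop arr i k)

-- generic fold/sum bridges
theorem sum_map_range (f : Nat → Int) (n : Nat) :
    ((List.range n).map f).sum = ∑ i ∈ Finset.range n, f i := by
  induction n with
  | zero => simp
  | succ n ih =>
    rw [List.range_succ, List.map_append, List.sum_append, Finset.sum_range_succ, ih]
    simp

theorem sel_self (pop : Int → Int → Bool) (arr : List Int) (l : Nat) : sel pop arr l l = l := by
  cases l with
  | zero => rfl
  | succ m => simp [sel]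

theorem sel_succ_val (pop : Int → Int → Bool) (arr : List Int) (l r : Nat) (h : l ≤ r) :
    sel pop arr l (r+1) =
      if pop (aG arr (sel pop arr l r)) (aG arr (r+1)) then r+1 else sel pop arr l r := by
  rw [sel, if_neg (by omega)]

theorem selMin_val (arr : List Int) (l r : Nat) (h : l ≤ r) :
    aG arr (sel (fun x y => decide (y < x)) arr l (r+1)) =
      if aG arr (r+1) < aG arr (sel (fun x y => decide (y < x)) arr l r) then aG arr (r+1)
      else aG arr (sel (fun x y => decide (y < x)) arr l r) := by
  rw [sel_succ_val _ _ _ _ h]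
  split_ifs with h1 h2 <;> simp_all

theorem selMax_val (arr : List Int) (l r : Nat) (h : l ≤ r) :
    aG arr (sel (fun x y => decide (x ≤ y)) arr l (r+1)) =
      if aG arr (r+1) > aG arr (sel (fun x y => decide (x ≤ y)) arr l r) then aG arr (r+1)
      else aG arr (sel (fun x y => decide (x ≤ y)) arr l r) := by
  rw [sel_succ_val _ _ _ _ h]
  split_ifs with h1 h2 <;> simp_all <;> omega

theorem inner_fold (nums : List Int) (F : Int × Int × Int → Nat → Int × Int × Int)
    (hF : ∀ s j', F s j' =
      (if nums.getD j' 0 < s.1 then nums.getD j' 0 else s.1,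
       if nums.getD j' 0 > s.2.1 then nums.getD j' 0 else s.2.1,
       s.2.2 + ((if nums.getD j' 0 > s.2.1 then nums.getD j' 0 else s.2.1) -
         (if nums.getD j' 0 < s.1 then nums.getD j' 0 else s.1)))) (i : Nat) :
    ∀ (c j : Nat) (t : Int), i ≤ j →
      (List.range' (j+1) c).foldl F
        (aG nums (sel (fun x y => decide (y < x)) nums i j),
         aG nums (sel (fun x y => decide (x ≤ y)) nums i j), t)
      = (aG nums (sel (fun x y => decide (y < x)) nums i (j+c)),
         aG nums (sel (fun x y => decide (x ≤ y)) nums i (j+c)),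
         t + ∑ r ∈ Finset.Ico (j+1) (j+1+c),
           (aG nums (sel (fun x y => decide (x ≤ y)) nums i r) -
             aG nums (sel (fun x y => decide (y < x)) nums i r))) := by
  intro c
  induction c with
  | zero => intro j t hij; simp
  | succ c ih =>
    intro j t hij
    rw [List.range'_succ, List.foldl_cons]
    have hstep :
        F (aG nums (sel (fun x y => decide (y < x)) nums i j),
           aG nums (sel (fun x y => decide (x ≤ y)) nums i j), t) (j+1)
        = (aG nums (sel (fun x y => decide (y < x)) nums i (j+1)),
           aG nums (sel (fun x y => decide (x ≤ y)) nums i (j+1)),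
           t + (aG nums (sel (fun x y => decide (x ≤ y)) nums i (j+1)) -
             aG nums (sel (fun x y => decide (y < x)) nums i (j+1)))) := by
      rw [hF]
      have h1 := selMin_val nums i j hij
      have h2 := selMax_val nums i j hij
      simp only [aG] at h1 h2 ⊢
      rw [← h1, ← h2]
    rw [hstep, ih (j+1) _ (by omega)]
    have h1 : j + 1 + c = j + (c+1) := by omega
    rw [h1]
    conv_rhs => rw [Finset.sum_eq_sum_Ico_succ_bot (show j+1 < j+1+(c+1) by omega)
      (fun r => aG nums (sel (fun x y => decide (x ≤ y)) nums i r) -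
        aG nums (sel (fun x y => decide (y < x)) nums i r))]
    have h2 : j + 1 + 1 + c = j + 1 + (c + 1) := by omega
    rw [h2]
    simp only [Prod.mk.injEq]
    exact ⟨trivial, trivial, by ring⟩

theorem inner_full (nums : List Int) (F : Int × Int × Int → Nat → Int × Int × Int)
    (hF : ∀ s j', F s j' =
      (if nums.getD j' 0 < s.1 then nums.getD j' 0 else s.1,
       if nums.getD j' 0 > s.2.1 then nums.getD j' 0 else s.2.1,
       s.2.2 + ((if nums.getD j' 0 > s.2.1 then nums.getD j' 0 else s.2.1) -
         (if nums.getD j' 0 < s.1 then nums.getD j' 0 else s.1)))) (i : Nat)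
    (hi : i < nums.length) (total : Int) :
    (List.range' i (nums.length - i)).foldl F (nums.getD i 0, nums.getD i 0, total)
      = (aG nums (sel (fun x y => decide (y < x)) nums i (nums.length - 1)),
         aG nums (sel (fun x y => decide (x ≤ y)) nums i (nums.length - 1)),
         total + ∑ r ∈ Finset.Ico i nums.length,
           (aG nums (sel (fun x y => decide (x ≤ y)) nums i r) -
             aG nums (sel (fun x y => decide (y < x)) nums i r))) := by
  have hn : nums.length - i = (nums.length - i - 1) + 1 := by omega
  rw [hn, List.range'_succ, List.foldl_cons]
  have hstep0 : F (nums.getD i 0, nums.getD i 0, total)  i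
      = (aG nums (sel (fun x y => decide (y < x)) nums i i),
         aG nums (sel (fun x y => decide (x ≤ y)) nums i i), total) := by
    rw [hF, sel_self, sel_self]
    simp [aG]
  rw [hstep0, inner_fold nums F hF i (nums.length - i - 1) i total le_rfl]
  have h3 : i + 1 + (nums.length - i - 1) = nums.length := by omega
  have h4 : i + (nums.length - i - 1) = nums.length - 1 := by omega
  rw [h3, h4]
  conv_rhs => rw [Finset.sum_eq_sum_Ico_succ_bot hi
    (fun r => aG nums (sel (fun x y => decide (x ≤ y)) nums i r) -
      aG nums (sel (fun x y => decide (y < x)) nums i r))]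
  rw [sel_self, sel_self]
  simp only [Prod.mk.injEq]
  exact ⟨trivial, trivial, by ring⟩

theorem alt_eq (nums : List Int) :
    subArrayRanges_alt nums =
      ∑ l ∈ Finset.range nums.length, ∑ r ∈ Finset.Ico l nums.length,
        (aG nums (sel (fun x y => decide (x ≤ y)) nums l r) -
          aG nums (sel (fun x y => decide (y < x)) nums l r)) := by
  unfold subArrayRanges_alt
  rw [PySem.List.foldl_congr_mem (List.range nums.length) _
    (fun (total : Int) i => total + ∑ r ∈ Finset.Ico i nums.length,
      (aG nums (sel (fun x y => decide (x ≤ y)) nums i r) -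
        aG nums (sel (fun x y => decide (y < x)) nums i r))) 0 ?_]
  · rw [PySem.List.foldl_add, zero_add, sum_map_range]
  · intro total i hi
    rw [List.mem_range] at hi
    rw [inner_full nums _ (fun s j' => rfl) i hi total]

theorem find?_split {α : Type} (p : α → Bool) :
    ∀ (l : List α) (b : α), l.find? p = some b →
      ∃ l1 l2, l = l1 ++ b :: l2 ∧ p b = true ∧ ∀ a ∈ l1, p a = false := by
  intro l
  induction l with
  | nil => intro b hb; simp at hb
  | cons x xs ih =>
    intro b hb
    by_cases hx : p x = true
    · rw [List.find?_cons_of_pos hx] at hb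
      obtain rfl : x = b := by injection hb
      exact ⟨[], xs, rfl, hx, by simp⟩
    · rw [List.find?_cons_of_neg hx] at hb
      obtain ⟨l1, l2, heq, hpb, hfa⟩ := ih b hb
      exact ⟨x :: l1, l2, by rw [heq]; rfl, hpb, by
        intro a ha
        rcases List.mem_cons.mp ha with rfl | ha
        · simpa using hx
        · exact hfa a ha⟩

theorem good_unique (pop : Int → Int → Bool) (arr : List Int) (l r i i' : Nat)
    (hi : Good pop arr l r i) (hi' : Good pop arr l r i') : i = i' := by
  rcases lt_trichotomy i i' with hlt | he | hgt
  · exact absurd (hi'.2.2.1 i hlt hi.1) (hi.2.2.2 i' (by have := hi'.2.1; omega) hlt)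
  · exact he
  · exact absurd (hi.2.2.1 i' hgt hi'.1) (hi'.2.2.2 i (by have := hi.2.1; omega) hgt)

theorem sel_good {pop : Int → Int → Bool} (h : PopOK pop) (arr : List Int) :
    ∀ r l, l ≤ r → Good pop arr l r (sel pop arr l r) := by
  intro r
  induction r with
  | zero =>
    intro l hl
    obtain rfl : l = 0 := by omega
    rw [sel_self]
    exact ⟨le_rfl, le_rfl, fun k hk _ => by omega, fun k hk1 hk2 => by omega⟩
  | succ r ih =>
    intro l hl
    by_cases hle : l = r + 1
    · subst hle
      rw [sel_self]
      exact ⟨le_rfl, le_rfl, fun k hk hk2 => by omega, fun k hk1 hk2 => by omega⟩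
    · have hlr : l ≤ r := by omega
      have hG := ih l hlr
      rw [sel_succ_val pop arr l r hlr]
      by_cases hc : pop (aG arr (sel pop arr l r)) (aG arr (r+1)) = true
      · rw [if_pos hc]
        refine ⟨by omega, le_rfl, ?_, fun k hk1 hk2 => by omega⟩
        intro k hk hlk
        rcases lt_trichotomy k (sel pop arr l r) with h1 | h1 | h1
        · exact h.1 _ _ _ (hG.2.2.1 k h1 hlk) hc
        · rw [h1]; exact hc
        · exact h.2 _ _ _ (hG.2.2.2 k (by omega) h1) hc
      · rw [if_neg hc]
        refine ⟨hG.1, by have := hG.2.1; omega, hG.2.2.1, ?_⟩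
        intro k hk1 hk2
        by_cases hk3 : k ≤ r
        · exact hG.2.2.2 k (by omega) hk2
        · have hk4 : k = r + 1 := by omega
          rw [hk4]; exact hc

theorem prevIdx_spec (pop : Int → Int → Bool) (arr : List Int) (i : Nat) :
    (prevIdx pop arr i = -1 ∧ ∀ k < i, Pp pop arr k i) ∨
    (∃ t : Nat, prevIdx pop arr i = (t : Int) ∧ t < i ∧ ¬ Pp pop arr t i ∧
      ∀ k, t < k → k < i → Pp pop arr k i) := by
  unfold prevIdx
  cases hf : (List.range i).reverse.find? (fun j => ! pop (aG arr j) (aG arr i)) with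
  | none =>
    left
    refine ⟨rfl, fun k hk => ?_⟩
    have := List.find?_eq_none.mp hf k (by simp [hk])
    simpa [Pp] using this
  | some t =>
    right
    obtain ⟨l1, l2, heq, hpb, hfa⟩ := find?_split _ _ _ hf
    have htmem : t ∈ (List.range i).reverse := by rw [heq]; simp
    have hti : t < i := by simpa using htmem
    have hpw : List.Pairwise (fun a b => b < a) ((List.range i).reverse) := by
      rw [List.pairwise_reverse]
      exact List.pairwise_lt_range
    rw [heq] at hpw
    refine ⟨t, rfl, hti, by simpa [Pp] using hpb, ?_⟩
    intro k hk1 hk2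
    have hkmem : k ∈ l1 ++ t :: l2 := by rw [← heq]; simp [hk2]
    have hkl1 : k ∈ l1 := by
      rcases List.mem_append.mp hkmem with h1 | h1
      · exact h1
      · rcases List.mem_cons.mp h1 with rfl | h2
        · omega
        · have := (List.pairwise_append.mp hpw).2.1
          have := (List.pairwise_cons.mp this).1 k h2
          omega
    have := hfa k hkl1
    simpa [Pp] using this

theorem nextIdx_spec (pop : Int → Int → Bool) (arr : List Int) (i : Nat) :
    (nextIdx pop arr i = (arr.length : Int) ∧ ∀ k, i < k → k < arr.length → ¬ Pp pop arr i k) ∨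
    (∃ t : Nat, nextIdx pop arr i = (t : Int) ∧ i < t ∧ t < arr.length ∧ Pp pop arr i t ∧
      ∀ k, i < k → k < t → ¬ Pp pop arr i k) := by
  unfold nextIdx partNext
  cases hf : (List.range' (i+1) (arr.length - (i+1))).find? (fun j' => pop (aG arr i) (aG arr j')) with
  | none =>
    left
    refine ⟨rfl, fun k hk1 hk2 => ?_⟩
    have := List.find?_eq_none.mp hf k (by rw [List.mem_range'_1]; omega)
    simpa [Pp] using this
  | some t =>
    right
    obtain ⟨l1, l2, heq, hpb, hfa⟩ := find?_split _ _ _ hf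
    have htmem : t ∈ List.range' (i+1) (arr.length - (i+1)) := by rw [heq]; simp
    rw [List.mem_range'_1] at htmem
    have hpw : List.Pairwise (fun a b => a < b) (List.range' (i+1) (arr.length - (i+1))) := by
      rw [List.range'_eq_map_range, List.pairwise_map]
      exact List.Pairwise.imp (by omega) List.pairwise_lt_range
    rw [heq] at hpw
    refine ⟨t, rfl, by omega, by omega, by simpa [Pp] using hpb, ?_⟩
    intro k hk1 hk2
    have hkmem : k ∈ l1 ++ t :: l2 := by rw [← heq, List.mem_range'_1]; omega
    have hkl1 : k ∈ l1 := by
      rcases List.mem_append.mp hkmem with h1 | h1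
      · exact h1
      · rcases List.mem_cons.mp h1 with rfl | h2
        · omega
        · have := (List.pairwise_append.mp hpw).2.1
          have := (List.pairwise_cons.mp this).1 k h2
          omega
    have := hfa k hkl1
    simpa [Pp] using this

theorem prevIdx_bounds (pop : Int → Int → Bool) (arr : List Int) (i : Nat) :
    -1 ≤ prevIdx pop arr i ∧ prevIdx pop arr i < (i : Int) := by
  rcases prevIdx_spec pop arr i with ⟨h1, _⟩ | ⟨t, h1, h2, _⟩
  · rw [h1]; constructor <;> omega
  · rw [h1]; constructor <;> omega

theorem nextIdx_bounds (pop : Int → Int → Bool) (arr : List Int) (i : Nat) (hi : i < arr.length) :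
    (i : Int) < nextIdx pop arr i ∧ nextIdx pop arr i ≤ (arr.length : Int) := by
  rcases nextIdx_spec pop arr i with ⟨h1, _⟩ | ⟨t, h1, h2, h3, _⟩
  · rw [h1]; constructor <;> omega
  · rw [h1]; constructor <;> omega

theorem prevIdx_lt_iff (pop : Int → Int → Bool) (arr : List Int) (i l : Nat) (hl : l ≤ i) :
    prevIdx pop arr i < (l : Int) ↔ ∀ k, l ≤ k → k < i → Pp pop arr k i := by
  rcases prevIdx_spec pop arr i with ⟨h1, h2⟩ | ⟨t, h1, h2, h3, h4⟩
  · rw [h1]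
    exact ⟨fun _ k _ hk => h2 k hk, fun _ => by omega⟩
  · rw [h1]
    constructor
    · intro hlt k hk1 hk2
      exact h4 k (by omega) hk2
    · intro hall
      by_contra hc
      exact h3 (hall t (by omega) h2)

theorem lt_nextIdx_iff (pop : Int → Int → Bool) (arr : List Int) (i r : Nat)
    (hir : i ≤ r) (hr : r < arr.length) :
    (r : Int) < nextIdx pop arr i ↔ ∀ k, i < k → k ≤ r → ¬ Pp pop arr i k := by
  rcases nextIdx_spec pop arr i with ⟨h1, h2⟩ | ⟨t, h1, h2, h3, h4, h5⟩
  · rw [h1]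
    exact ⟨fun _ k hk1 hk2 => h2 k hk1 (by omega), fun _ => by omega⟩
  · rw [h1]
    constructor
    · intro hlt k hk1 hk2
      exact h5 k hk1 (by omega)
    · intro hall
      by_contra hc
      exact hall t h2 (by omega) h4

theorem good_iff_rect {pop : Int → Int → Bool} (arr : List Int) (l r i : Nat)
    (hr : r < arr.length) (hlr : l ≤ r) :
    Good pop arr l r i ↔
      (prevIdx pop arr i < (l : Int) ∧ l ≤ i ∧ i ≤ r ∧ (r : Int) < nextIdx pop arr i) := by
  constructor
  · rintro ⟨h1, h2, h3, h4⟩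
    refine ⟨(prevIdx_lt_iff pop arr i l h1).mpr (fun k hk1 hk2 => h3 k hk2 hk1), h1, h2, ?_⟩
    exact (lt_nextIdx_iff pop arr i r h2 hr).mpr (fun k hk1 hk2 => h4 k (by omega) hk1)
  · rintro ⟨h1, h2, h3, h4⟩
    refine ⟨h2, h3, fun k hk1 hk2 => (prevIdx_lt_iff pop arr i l h2).mp h1 k hk2 hk1, ?_⟩
    exact fun k hk1 hk2 => (lt_nextIdx_iff pop arr i r h3 hr).mp h4 k hk2 (by omega)

theorem getD_set_lt (l : List Int) (t j : Nat) (v : Int) (ht : t < l.length) :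
    (l.set t v).getD j 0 = if t = j then v else l.getD j 0 := by
  rw [List.getD_eq_getElem?_getD, List.getD_eq_getElem?_getD, List.getElem?_set]
  split_ifs with h1 <;> rfl

theorem pairwise_not_head {pop : Int → Int → Bool} {arr : List Int} (h : PopOK pop) (k t : Nat)
    (rest : List Nat)
    (hp : List.Pairwise (fun x y => ¬ Pp pop arr y x ∧ y < x) (t :: rest))
    (hk : ¬ Pp pop arr t k) : ∀ u ∈ t :: rest, ¬ Pp pop arr u k := by
  intro u hu
  rcases List.mem_cons.mp hu with rfl | hu
  · exact hk
  · exact popOK_not_trans h ((List.pairwise_cons.mp hp).1 u hu).1 hk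

theorem partNext_zero (pop : Int → Int → Bool) (arr : List Int) (j : Nat) :
    partNext pop arr 0 j = (arr.length : Int) := by
  unfold partNext
  have h0 : 0 - (j+1) = 0 := by omega
  rw [h0]
  rfl

theorem partNext_ge {pop : Int → Int → Bool} {arr : List Int} (k j : Nat) (hjk : k ≤ j) :
    partNext pop arr (k+1) j = partNext pop arr k j := by
  unfold partNext
  have h1 : (k+1) - (j+1) = 0 := by omega
  have h2 : k - (j+1) = 0 := by omega
  rw [h1, h2]

theorem partNext_stable {pop : Int → Int → Bool} {arr : List Int} (k j : Nat) (hjk : j < k)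
    (hcase : (∃ x, j < x ∧ x < k ∧ Pp pop arr j x) ∨ ¬ Pp pop arr j k) :
    partNext pop arr (k+1) j = partNext pop arr k j := by
  unfold partNext
  have h1 : (k+1) - (j+1) = (k - (j+1)) + 1 := by omega
  rw [h1, List.range'_concat]
  have h2 : j + 1 + 1 * (k - (j+1)) = k := by omega
  rw [h2, List.find?_append]
  cases hf : (List.range' (j+1) (k - (j+1))).find? (fun j' => pop (aG arr j) (aG arr j')) with
  | some t => rw [Option.some_or]
  | none =>
    rw [Option.none_or]
    rcases hcase with ⟨x, hx1, hx2, hx3⟩ | hnp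
    · exact absurd hx3 (by
        have := List.find?_eq_none.mp hf x (by rw [List.mem_range'_1]; omega)
        simpa [Pp] using this)
    · have hnp' : ¬ ((fun j' => pop (aG arr j) (aG arr j')) k = true) := hnp
      rw [List.find?_cons_of_neg (p := fun j' => pop (aG arr j) (aG arr j')) (a := k)
        (l := ([] : List Nat)) hnp', List.find?_nil]

theorem partNext_found {pop : Int → Int → Bool} {arr : List Int} (k j : Nat) (hjk : j < k)
    (hA : ∀ x, j < x → x < k → ¬ Pp pop arr j x) (hP : Pp pop arr j k) :
    partNext pop arr (k+1) j = (k : Int) := by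
  unfold partNext
  have h1 : (k+1) - (j+1) = (k - (j+1)) + 1 := by omega
  rw [h1, List.range'_concat]
  have h2 : j + 1 + 1 * (k - (j+1)) = k := by omega
  rw [h2, List.find?_append]
  have hnone : (List.range' (j+1) (k - (j+1))).find? (fun j' => pop (aG arr j) (aG arr j')) = none := by
    rw [List.find?_eq_none]
    intro x hx
    rw [List.mem_range'_1] at hx
    simpa [Pp] using hA x (by omega) (by omega)
  have hP' : (fun j' => pop (aG arr j) (aG arr j')) k = true := hP
  rw [hnone, Option.none_or, List.find?_cons_of_pos (p := fun j' => pop (aG arr j) (aG arr j'))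
    (a := k) (l := ([] : List Nat)) hP']

theorem popNextLoop_spec (pop : Int → Int → Bool) (arr : List Int) (k : Nat) :
    ∀ (st : List Nat) (res : List Int), (∀ t ∈ st, t < res.length) →
      ∃ pre : List Nat,
        st = pre ++ (popNextLoop pop arr k st res).1 ∧
        (∀ t ∈ pre, Pp pop arr t k) ∧
        (∀ t rest', (popNextLoop pop arr k st res).1 = t :: rest' → ¬ Pp pop arr t k) ∧
        (popNextLoop pop arr k st res).2.length = res.length ∧
        (∀ j, (popNextLoop pop arr k st res).2.getD j 0 =
          if j ∈ pre then (k : Int) else res.getD j 0) := by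
  intro st
  induction st with
  | nil =>
    intro res hlen
    refine ⟨[], by simp [popNextLoop], by simp, ?_, by simp [popNextLoop], by simp [popNextLoop]⟩
    intro t rest' ht
    simp [popNextLoop] at ht
  | cons t st ih =>
    intro res hlen
    by_cases hc : pop (arr.getD t 0) (arr.getD k 0) = true
    · have hred : popNextLoop pop arr k (t :: st) res = popNextLoop pop arr k st (res.set t (k : Int)) := by
        simp only [popNextLoop]
        rw [if_pos hc]
      obtain ⟨pre, h1, h2, h3, h4, h5⟩ := ih (res.set t (k : Int))
        (by intro u hu; rw [List.length_set]; exact hlen u (List.mem_cons_of_mem _ hu))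
      refine ⟨t :: pre, ?_, ?_, ?_, ?_, ?_⟩
      · rw [hred, List.cons_append, ← h1]
      · intro u hu
        rcases List.mem_cons.mp hu with rfl | hu
        · exact hc
        · exact h2 u hu
      · rw [hred]; exact h3
      · rw [hred, h4, List.length_set]
      · intro j
        rw [hred, h5 j]
        by_cases hj : j ∈ pre
        · rw [if_pos hj, if_pos (List.mem_cons_of_mem _ hj)]
        · rw [if_neg hj]
          have htlen : t < res.length := hlen t List.mem_cons_self
          rw [getD_set_lt res t j _ htlen]
          by_cases hjt : t = j
          · rw [if_pos hjt, if_pos (by rw [← hjt]; exact List.mem_cons_self)]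
          · rw [if_neg hjt, if_neg (by
              intro hmem
              rcases List.mem_cons.mp hmem with h' | h'
              · exact hjt h'.symm
              · exact hj h')]
    · have hred : popNextLoop pop arr k (t :: st) res = (t :: st, res) := by
        simp only [popNextLoop]
        rw [if_neg hc]
      refine ⟨[], by simp [hred], by simp, ?_, by simp [hred], by simp [hred]⟩
      intro u rest' hu
      rw [hred] at hu
      obtain rfl : u = t := by injection hu with h' _; exact h'.symm
      exact hc

def InvN (pop : Int → Int → Bool) (arr : List Int) (k : Nat) (p : List Nat × List Int) : Prop :=
  (∀ j, j ∈ p.1 ↔ Alive pop arr k j) ∧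
  List.Pairwise (fun x y => ¬ Pp pop arr y x ∧ y < x) p.1 ∧
  p.2.length = arr.length ∧
  (∀ j < arr.length, p.2.getD j 0 = partNext pop arr k j)

theorem stepN {pop : Int → Int → Bool} (h : PopOK pop) (arr : List Int) (k : Nat)
    (hk : k < arr.length) (p : List Nat × List Int) (hp : InvN pop arr k p) :
    InvN pop arr (k+1) (k :: (popNextLoop pop arr k p.1 p.2).1, (popNextLoop pop arr k p.1 p.2).2) := by
  obtain ⟨hmem, hpw, hlen, hres⟩ := hp
  have hlt : ∀ t ∈ p.1, t < p.2.length := by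
    intro t ht
    rw [hlen]
    have := ((hmem t).mp ht).1
    omega
  obtain ⟨pre, h1, h2, h3, h4, h5⟩ := popNextLoop_spec pop arr k p.1 p.2 hlt
  have hsurv : ∀ u ∈ (popNextLoop pop arr k p.1 p.2).1, ¬ Pp pop arr u k := by
    cases hq : (popNextLoop pop arr k p.1 p.2).1 with
    | nil => simp
    | cons t rest =>
      have hpw' : List.Pairwise (fun x y => ¬ Pp pop arr y x ∧ y < x) (t :: rest) := by
        rw [h1] at hpw
        have := (List.pairwise_append.mp hpw).2.1
        rwa [hq] at this
      exact pairwise_not_head h k t rest hpw' (h3 t rest hq)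
  have hq1sub : ∀ u ∈ (popNextLoop pop arr k p.1 p.2).1, u ∈ p.1 := by
    intro u hu
    rw [h1]
    exact List.mem_append_right _ hu
  have hpresub : ∀ u ∈ pre, u ∈ p.1 := by
    intro u hu
    rw [h1]
    exact List.mem_append_left _ hu
  refine ⟨?_, ?_, h4.trans hlen, ?_⟩
  · intro j
    constructor
    · intro hj
      rcases List.mem_cons.mp hj with rfl | hj
      · exact ⟨by omega, fun j' hj1 hj2 => by omega⟩
      · have hA := (hmem j).mp (hq1sub j hj)
        have hnp := hsurv j hj
        refine ⟨by have := hA.1; omega, fun j' hj1 hj2 => ?_⟩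
        rcases Nat.lt_succ_iff_lt_or_eq.mp hj2 with h' | h'
        · exact hA.2 j' hj1 h'
        · rw [h']; exact hnp
    · intro hA
      by_cases hjk : j = k
      · rw [hjk]; exact List.mem_cons_self
      · have hjk' : j < k := by have := hA.1; omega
        have hAk : Alive pop arr k j := ⟨hjk', fun j' ha hb => hA.2 j' ha (by omega)⟩
        have hin : j ∈ p.1 := (hmem j).mpr hAk
        rw [h1] at hin
        rcases List.mem_append.mp hin with hjpre | hjq
        · exact absurd (h2 j hjpre) (hA.2 k hjk' (by omega))
        · exact List.mem_cons_of_mem _ hjq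
  · rw [List.pairwise_cons]
    refine ⟨fun u hu => ⟨hsurv u hu, ((hmem u).mp (hq1sub u hu)).1⟩, ?_⟩
    rw [h1] at hpw
    exact (List.pairwise_append.mp hpw).2.1
  · intro j hj
    rw [h5 j]
    by_cases hjpre : j ∈ pre
    · rw [if_pos hjpre]
      have hA := (hmem j).mp (hpresub j hjpre)
      exact (partNext_found k j hA.1 hA.2 (h2 j hjpre)).symm
    · rw [if_neg hjpre, hres j hj]
      by_cases hjk : j < k
      · refine (partNext_stable k j hjk ?_).symm
        by_cases hAj : Alive pop arr k j
        · right
          have hin : j ∈ p.1 := (hmem j).mpr hAj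
          rw [h1] at hin
          rcases List.mem_append.mp hin with h' | h'
          · exact absurd h' hjpre
          · exact hsurv j h'
        · left
          unfold Alive at hAj
          push_neg at hAj
          obtain ⟨x, hx1, hx2, hx3⟩ := hAj hjk
          exact ⟨x, hx1, hx2, hx3⟩
      · exact (partNext_ge k j (by omega)).symm

theorem calcNext_inv {pop : Int → Int → Bool} (h : PopOK pop) (arr : List Int) :
    ∀ k, k ≤ arr.length → InvN pop arr k ((List.range k).foldl
      (fun (p : List Nat × List Int) i =>
        match popNextLoop pop arr i p.1 p.2 with
        | (st, res) => (i :: st, res))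
      ([], List.replicate arr.length (arr.length : Int))) := by
  intro k
  induction k with
  | zero =>
    intro _
    refine ⟨?_, List.Pairwise.nil, by simp, ?_⟩
    · intro j
      simp [Alive]
    · intro j hj
      simp only [List.range_zero, List.foldl_nil]
      show (List.replicate arr.length ((arr.length : Int))).getD j 0 = _
      rw [List.getD_replicate _ hj, partNext_zero]
  | succ k ih =>
    intro hk1
    rw [List.range_succ, List.foldl_append, List.foldl_cons, List.foldl_nil]
    exact stepN h arr k (by omega) _ (ih (by omega))

theorem calcNext_getD {pop : Int → Int → Bool} (h : PopOK pop) (arr : List Int) :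
    ∀ j < arr.length, (calcNext pop arr).getD j 0 = nextIdx pop arr j := by
  intro j hj
  exact (calcNext_inv h arr arr.length le_rfl).2.2.2 j hj

theorem popPrevLoop_spec (pop : Int → Int → Bool) (arr : List Int) (k : Nat) :
    ∀ st : List Nat,
      ∃ pre : List Nat,
        st = pre ++ popPrevLoop pop arr k st ∧
        (∀ t ∈ pre, Pp pop arr t k) ∧
        (∀ t rest', popPrevLoop pop arr k st = t :: rest' → ¬ Pp pop arr t k) := by
  intro st
  induction st with
  | nil =>
    refine ⟨[], by simp [popPrevLoop], by simp, ?_⟩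
    intro t rest' ht
    simp [popPrevLoop] at ht
  | cons t st ih =>
    by_cases hc : pop (arr.getD t 0) (arr.getD k 0) = true
    · have hred : popPrevLoop pop arr k (t :: st) = popPrevLoop pop arr k st := by
        simp only [popPrevLoop]
        rw [if_pos hc]
      obtain ⟨pre, h1, h2, h3⟩ := ih
      refine ⟨t :: pre, by rw [hred, List.cons_append, ← h1], ?_, by rw [hred]; exact h3⟩
      intro u hu
      rcases List.mem_cons.mp hu with rfl | hu
      · exact hc
      · exact h2 u hu
    · have hred : popPrevLoop pop arr k (t :: st) = t :: st := by
        simp only [popPrevLoop]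
        rw [if_neg hc]
      refine ⟨[], by simp [hred], by simp, ?_⟩
      intro u rest' hu
      rw [hred] at hu
      obtain rfl : u = t := by injection hu with h' _; exact h'.symm
      exact hc

theorem descend {pop : Int → Int → Bool} {arr : List Int} (h : PopOK pop) (k : Nat)
    (c : Nat → Prop)
    (hup : ∀ j j', c j → j < j' → j' < k → c j')
    (halive : ∀ j, c j → j < k → Alive pop arr k j → Pp pop arr j k) :
    ∀ j, c j → j < k → Pp pop arr j k := by
  have H : ∀ m j, k - j ≤ m → c j → j < k → Pp pop arr j k := by
    intro m
    induction m with
    | zero => intro j hm _ hj; exact absurd hj (by omega)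
    | succ m ih =>
      intro j hm hc hj
      by_cases hAj : Alive pop arr k j
      · exact halive j hc hj hAj
      · unfold Alive at hAj
        push_neg at hAj
        obtain ⟨x, hx1, hx2, hx3⟩ := hAj hj
        exact h.1 _ _ _ hx3 (ih x (by omega) (hup j x hc hx1 hx2) hx2)
  exact fun j => H (k - j) j le_rfl

theorem prevIdx_eq_neg_one {pop : Int → Int → Bool} {arr : List Int} (k : Nat)
    (hall : ∀ j, j < k → Pp pop arr j k) : prevIdx pop arr k = -1 := by
  unfold prevIdx
  have hf : (List.range k).reverse.find? (fun j => ! pop (aG arr j) (aG arr k)) = none := by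
    rw [List.find?_eq_none]
    intro x hx
    rw [List.mem_reverse, List.mem_range] at hx
    simpa [Pp] using hall x hx
  rw [hf]

theorem prevIdx_eq_of {pop : Int → Int → Bool} {arr : List Int} (k t : Nat) (ht : t < k)
    (hnp : ¬ Pp pop arr t k) (hall : ∀ j, t < j → j < k → Pp pop arr j k) :
    prevIdx pop arr k = (t : Int) := by
  unfold prevIdx
  have hsplit : List.range k = List.range (t+1) ++ List.range' (t+1) (k-(t+1)) := by
    have he : (t+1) + (k-(t+1)) = k := by omega
    conv_lhs => rw [← he]
    rw [List.range_add]
    simp [List.range'_eq_map_range]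
  rw [hsplit, List.reverse_append, List.find?_append]
  have h1 : (List.range' (t+1) (k-(t+1))).reverse.find? (fun j => ! pop (aG arr j) (aG arr k)) = none := by
    rw [List.find?_eq_none]
    intro x hx
    rw [List.mem_reverse, List.mem_range'_1] at hx
    simpa [Pp] using hall x (by omega) (by omega)
  rw [h1, Option.none_or, List.range_succ, List.reverse_append]
  have h2 : ([t] : List Nat).reverse ++ (List.range t).reverse = t :: (List.range t).reverse := by
    simp
  rw [h2]
  have hpt : (fun j => ! pop (aG arr j) (aG arr k)) t = true := by simpa [Pp] using hnp
  rw [List.find?_cons_of_pos (p := fun j => ! pop (aG arr j) (aG arr k)) (a := t)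
    (l := (List.range t).reverse) hpt]

def InvP (pop : Int → Int → Bool) (arr : List Int) (k : Nat) (p : List Nat × List Int) : Prop :=
  (∀ j, j ∈ p.1 ↔ Alive pop arr k j) ∧
  List.Pairwise (fun x y => ¬ Pp pop arr y x ∧ y < x) p.1 ∧
  p.2.length = arr.length ∧
  (∀ j < arr.length, p.2.getD j 0 = if j < k then prevIdx pop arr j else -1)

theorem stepP {pop : Int → Int → Bool} (h : PopOK pop) (arr : List Int) (k : Nat)
    (hk : k < arr.length) (p : List Nat × List Int) (hp : InvP pop arr k p) :
    InvP pop arr (k+1) (match p.1 with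
      | [] => (k :: p.1, p.2)
      | _ :: _ =>
        match popPrevLoop pop arr k p.1 with
        | [] => ([k], p.2.set k (-1))
        | t :: st => (k :: t :: st, p.2.set k (t : Int))) := by
  obtain ⟨hmem, hpw, hlen, hres⟩ := hp
  cases hstack : p.1 with
  | nil =>
    rw [hstack] at hmem
    have hk0 : k = 0 := by
      by_contra hne
      have hA : Alive pop arr k (k-1) := ⟨by omega, fun j' h1 h2 => by omega⟩
      have := (hmem (k-1)).mpr hA
      simp at this
    subst hk0
    refine ⟨?_, by simp, hlen, ?_⟩
    · intro j
      constructor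
      · intro hj
        simp at hj
        rw [hj]
        exact ⟨by omega, fun j' a b => by omega⟩
      · intro hA
        have hj0 : j = 0 := by have := hA.1; omega
        simp [hj0]
    · intro j hj
      rw [hres j hj]
      by_cases hj0 : j = 0
      · rw [if_neg (by omega), if_pos (by omega), hj0,
          prevIdx_eq_neg_one 0 (fun u hu => by omega)]
      · rw [if_neg (by omega), if_neg (by omega)]
  | cons t0 st0 =>
    rw [hstack] at hmem hpw
    obtain ⟨pre, h1, h2, h3⟩ := popPrevLoop_spec pop arr k (t0 :: st0)
    cases hq : popPrevLoop pop arr k (t0 :: st0) with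
    | nil =>
      rw [hq] at h1
      rw [List.append_nil] at h1
      have hall : ∀ j, j < k → Pp pop arr j k := by
        intro j hjk
        refine descend (arr := arr) h k (fun _ => True) (fun _ _ _ _ _ => trivial)
          ?_ j trivial hjk
        intro u _ huk hA
        exact h2 u (by rw [← h1]; exact (hmem u).mpr hA)
      refine ⟨?_, by simp, by rw [List.length_set]; exact hlen, ?_⟩
      · intro j
        constructor
        · intro hj
          simp at hj
          rw [hj]
          exact ⟨by omega, fun j' a b => by omega⟩
        · intro hA
          by_cases hjk : j = k
          · simp [hjk]
          · have hjk' : j < k := by have := hA.1; omega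
            exact absurd (hall j hjk') (hA.2 k hjk' (by omega))
      · intro j hj
        have hklen : k < p.2.length := by rw [hlen]; omega
        rw [getD_set_lt p.2 k j _ hklen]
        by_cases hjk : k = j
        · rw [if_pos hjk, if_pos (by omega), ← hjk, prevIdx_eq_neg_one k hall]
        · rw [if_neg hjk, hres j hj]
          by_cases hjk2 : j < k
          · rw [if_pos hjk2, if_pos (by omega)]
          · rw [if_neg hjk2, if_neg (by omega)]
    | cons t rest =>
      have hnp : ¬ Pp pop arr t k := h3 t rest hq
      rw [hq] at h1
      have htmem : t ∈ t0 :: st0 := by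
        rw [h1]
        exact List.mem_append_right _ List.mem_cons_self
      have hAt : Alive pop arr k t := (hmem t).mp htmem
      have hpw2 : List.Pairwise (fun x y => ¬ Pp pop arr y x ∧ y < x) (t :: rest) := by
        rw [h1] at hpw
        exact (List.pairwise_append.mp hpw).2.1
      have hall : ∀ j, t < j → j < k → Pp pop arr j k := by
        intro j0 hj0 hj0k
        refine descend (arr := arr) h k (fun j => t < j) (fun j j' hc hlt hk' => by omega)
          ?_ j0 hj0 hj0k
        intro j hcj hjk hA
        have hin : j ∈ t0 :: st0 := (hmem j).mpr hA
        rw [h1] at hin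
        rcases List.mem_append.mp hin with h' | h'
        · exact h2 j h'
        · rcases List.mem_cons.mp h' with rfl | h''
          · omega
          · have := ((List.pairwise_cons.mp hpw2).1 j h'').2
            omega
      have hprev : prevIdx pop arr k = (t : Int) := prevIdx_eq_of k t hAt.1 hnp hall
      have hsurv : ∀ u ∈ t :: rest, ¬ Pp pop arr u k := pairwise_not_head h k t rest hpw2 hnp
      refine ⟨?_, ?_, by rw [List.length_set]; exact hlen, ?_⟩
      · intro j
        constructor
        · intro hj
          rcases List.mem_cons.mp hj with rfl | hj2
          · exact ⟨by omega, fun j' a b => by omega⟩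
          · have hin : j ∈ t0 :: st0 := by rw [h1]; exact List.mem_append_right _ hj2
            have hA := (hmem j).mp hin
            refine ⟨by have := hA.1; omega, fun j' a b => ?_⟩
            rcases Nat.lt_succ_iff_lt_or_eq.mp b with h' | h'
            · exact hA.2 j' a h'
            · rw [h']; exact hsurv j hj2
        · intro hA
          by_cases hjk : j = k
          · rw [hjk]; exact List.mem_cons_self
          · have hjk' : j < k := by have := hA.1; omega
            have hAk : Alive pop arr k j := ⟨hjk', fun j' a b => hA.2 j' a (by omega)⟩
            have hin : j ∈ t0 :: st0 := (hmem j).mpr hAk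
            rw [h1] at hin
            rcases List.mem_append.mp hin with h' | h'
            · exact absurd (h2 j h') (hA.2 k hjk' (by omega))
            · exact List.mem_cons_of_mem _ h'
      · rw [List.pairwise_cons]
        constructor
        · intro u hu
          refine ⟨hsurv u hu, ?_⟩
          have hin : u ∈ t0 :: st0 := by rw [h1]; exact List.mem_append_right _ hu
          exact ((hmem u).mp hin).1
        · exact hpw2
      · intro j hj
        have hklen : k < p.2.length := by rw [hlen]; omega
        rw [getD_set_lt p.2 k j _ hklen]
        by_cases hjk : k = j
        · rw [if_pos hjk, if_pos (by omega), ← hjk, hprev]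
        · rw [if_neg hjk, hres j hj]
          by_cases hjk2 : j < k
          · rw [if_pos hjk2, if_pos (by omega)]
          · rw [if_neg hjk2, if_neg (by omega)]

theorem calcPrev_inv {pop : Int → Int → Bool} (h : PopOK pop) (arr : List Int) :
    ∀ k, k ≤ arr.length → InvP pop arr k ((List.range k).foldl
      (fun (p : List Nat × List Int) i =>
        match p.1 with
        | [] => (i :: p.1, p.2)
        | _ :: _ =>
          match popPrevLoop pop arr i p.1 with
          | [] => ([i], p.2.set i (-1))
          | t :: st => (i :: t :: st, p.2.set i (t : Int)))
      ([], List.replicate arr.length (-1 : Int))) := by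
  intro k
  induction k with
  | zero =>
    intro _
    refine ⟨?_, List.Pairwise.nil, by simp, ?_⟩
    · intro j
      simp [Alive]
    · intro j hj
      simp only [List.range_zero, List.foldl_nil]
      show (List.replicate arr.length (-1 : Int)).getD j 0 = _
      rw [List.getD_replicate _ hj, if_neg (by omega)]
  | succ k ih =>
    intro hk1
    rw [List.range_succ, List.foldl_append, List.foldl_cons, List.foldl_nil]
    exact stepP h arr k (by omega) _ (ih (by omega))

theorem calcPrev_getD {pop : Int → Int → Bool} (h : PopOK pop) (arr : List Int) :
    ∀ j < arr.length, (calcPrev pop arr).getD j 0 = prevIdx pop arr j := by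
  intro j hj
  have hinv := (calcPrev_inv h arr arr.length le_rfl).2.2.2 j hj
  unfold calcPrev
  rw [hinv, if_pos hj]

theorem sumPart_eq {pop : Int → Int → Bool} (h : PopOK pop) (arr : List Int) :
    sumPart pop arr =
      ∑ i ∈ Finset.range arr.length,
        ((i : Int) - prevIdx pop arr i) * (nextIdx pop arr i - (i : Int)) * aG arr i := by
  show (List.range arr.length).foldl
      (fun (res : Int) (i : Nat) => res + ((i : Int) - (calcPrev pop arr).getD i 0) *
        ((calcNext pop arr).getD i 0 - (i : Int)) * arr.getD i 0) 0 = _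
  rw [PySem.List.foldl_add (List.range arr.length)
    (fun (i : Nat) => ((i : Int) - (calcPrev pop arr).getD i 0) *
      ((calcNext pop arr).getD i 0 - (i : Int)) * arr.getD i 0) 0]
  rw [zero_add, sum_map_range]
  refine Finset.sum_congr rfl (fun i hi => ?_)
  rw [Finset.mem_range] at hi
  rw [calcNext_getD h arr i hi, calcPrev_getD h arr i hi]
  rfl

theorem counting {pop : Int → Int → Bool} (h : PopOK pop) (arr : List Int) :
    (∑ i ∈ Finset.range arr.length,
        ((i : Int) - prevIdx pop arr i) * (nextIdx pop arr i - (i : Int)) * aG arr i) =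
      ∑ l ∈ Finset.range arr.length, ∑ r ∈ Finset.Ico l arr.length, aG arr (sel pop arr l r) := by
  symm
  have hstep1 : ∀ l ∈ Finset.range arr.length, ∀ r ∈ Finset.Ico l arr.length,
      aG arr (sel pop arr l r) = ∑ i ∈ Finset.range arr.length,
        if sel pop arr l r = i then aG arr i else 0 := by
    intro l hl r hr
    rw [Finset.mem_Ico] at hr
    rw [Finset.sum_ite_eq (Finset.range arr.length) (sel pop arr l r) (fun i => aG arr i), if_pos]
    exact Finset.mem_range.mpr (by have := (sel_good h arr r l hr.1).2.1; omega)
  rw [Finset.sum_congr rfl (fun l hl => Finset.sum_congr rfl (fun r hr => hstep1 l hl r hr))]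
  rw [Finset.sum_congr rfl (fun l _ => Finset.sum_comm), Finset.sum_comm]
  refine Finset.sum_congr rfl (fun i hi => ?_)
  rw [Finset.mem_range] at hi
  have hb1 := prevIdx_bounds pop arr i
  have hb2 := nextIdx_bounds pop arr i hi
  set pL := (prevIdx pop arr i + 1).toNat with hpLdef
  set pR := (nextIdx pop arr i).toNat with hpRdef
  have hpL : (pL : Int) = prevIdx pop arr i + 1 := Int.toNat_of_nonneg (by omega)
  have hpR : (pR : Int) = nextIdx pop arr i := Int.toNat_of_nonneg (by omega)
  have hpRn : pR ≤ arr.length := by omega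
  have hiff : ∀ l ∈ Finset.range arr.length, ∀ r ∈ Finset.Ico l arr.length,
      (sel pop arr l r = i ↔ (pL ≤ l ∧ l ≤ i) ∧ (i ≤ r ∧ r < pR)) := by
    intro l hl r hr
    rw [Finset.mem_range] at hl
    rw [Finset.mem_Ico] at hr
    have hg := sel_good h arr r l hr.1
    constructor
    · intro hsel
      rw [hsel] at hg
      have hrect := (good_iff_rect arr l r i hr.2 hr.1).mp hg
      refine ⟨⟨by omega, hrect.2.1⟩, hrect.2.2.1, by omega⟩
    · rintro ⟨⟨h1, h2⟩, h3, h4⟩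
      have hgood : Good pop arr l r i :=
        (good_iff_rect arr l r i hr.2 hr.1).mpr ⟨by omega, h2, h3, by omega⟩
      exact good_unique pop arr l r _ i hg hgood
  have hL : ∀ l ∈ Finset.range arr.length,
      (∑ r ∈ Finset.Ico l arr.length, if sel pop arr l r = i then aG arr i else 0)
        = if pL ≤ l ∧ l ≤ i then ((pR - i : Nat) : Int) * aG arr i else 0 := by
    intro l hl
    by_cases hcond : pL ≤ l ∧ l ≤ i
    · rw [if_pos hcond]
      have hrw : ∀ r ∈ Finset.Ico l arr.length,
          (if sel pop arr l r = i then aG arr i else 0)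
            = if r ∈ Finset.Ico i pR then aG arr i else 0 := by
        intro r hr
        refine if_congr ?_ rfl rfl
        rw [hiff l hl r hr, Finset.mem_Ico]
        exact ⟨fun hx => hx.2, fun hx => ⟨hcond, hx⟩⟩
      rw [Finset.sum_congr rfl hrw, Finset.sum_ite_mem]
      have hinter : Finset.Ico l arr.length ∩ Finset.Ico i pR = Finset.Ico i pR := by
        rw [Finset.Ico_inter_Ico, max_eq_right hcond.2, min_eq_right hpRn]
      rw [hinter, Finset.sum_const, Nat.card_Ico, nsmul_eq_mul]
    · rw [if_neg hcond]
      refine Finset.sum_eq_zero (fun r hr => ?_)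
      rw [if_neg]
      rw [hiff l hl r hr]
      tauto
  rw [Finset.sum_congr rfl hL]
  have hrw2 : ∀ l ∈ Finset.range arr.length,
      (if pL ≤ l ∧ l ≤ i then ((pR - i : Nat) : Int) * aG arr i else 0)
        = if l ∈ Finset.Ico pL (i+1) then ((pR - i : Nat) : Int) * aG arr i else 0 := by
    intro l _
    refine if_congr ?_ rfl rfl
    rw [Finset.mem_Ico]
    omega
  rw [Finset.sum_congr rfl hrw2, Finset.sum_ite_mem]
  have hinter2 : Finset.range arr.length ∩ Finset.Ico pL (i+1) = Finset.Ico pL (i+1) := by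
    rw [Finset.range_eq_Ico, Finset.Ico_inter_Ico, max_eq_right (Nat.zero_le _),
      min_eq_right (by omega)]
  rw [hinter2, Finset.sum_const, Nat.card_Ico, nsmul_eq_mul]
  have e1 : ((i + 1 - pL : Nat) : Int) = (i : Int) - prevIdx pop arr i := by omega
  have e2 : ((pR - i : Nat) : Int) = nextIdx pop arr i - (i : Int) := by omega
  rw [e1, e2]
  ring



-- ===== VERDICT (by name: the statement is the Claim_ definition above) =====
theorem subArrayRanges_spec : Claim_equal_subArrayRanges := by
  intro nums _
  unfold Spec_subArrayRanges subArrayRanges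
  rw [sumPart_eq popOK_max, sumPart_eq popOK_min, counting popOK_max, counting popOK_min,
    alt_eq, ← Finset.sum_sub_distrib]
  refine Finset.sum_congr rfl fun l _ => ?_
  rw [← Finset.sum_sub_distrib]
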